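-- pv_equiv track=rewrite | github.com/Premendu/3rd_year_project | analyzer.py | estimate_charset_size
-- ===== SOURCE A (Python) =====
-- SYMBOLS = "!@#$%^&*()-_=+[]{};:'\",.<>?/|\\`~"
--
-- def estimate_charset_size(password):
--     size = 0
--     if any(c.islower() for c in password): size += 26
--     if any(c.isupper() for c in password): size += 26
--     if any(c.isdigit() for c in password): size += 10
--     if any(c in SYMBOLS for c in password): size += len(SYMBOLS)
--     if any(ord(c) > 127 for c in password): size += 100
--     return max(size, 1)
-- ===== SOURCE B (Python) =====
-- SYMBOLS = "!@#$%^&*()-_=+[]{};:'\",.<>?/|\\`~"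
--
-- def estimate_charset_size(password):
--     has_lower = has_upper = has_digit = has_symbol = has_nonascii = False
--     for c in password:
--         if c.islower(): has_lower = True
--         if c.isupper(): has_upper = True
--         if c.isdigit(): has_digit = True
--         if c in SYMBOLS: has_symbol = True
--         if ord(c) > 127: has_nonascii = True
--     size = 0
--     if has_lower: size += 26
--     if has_upper: size += 26
--     if has_digit: size += 10
--     if has_symbol: size += len(SYMBOLS)
--     if has_nonascii: size += 100
--     return max(size, 1)
-- ===== Notes on version B (the rewrite author's own statement) =====
-- stated objective: alternative
-- what changed: B replaces A's five independent full scans of the password (one any(...) per category) with a single traversal that maintains five category flags, summing the weights once at the end.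
import Mathlib
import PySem

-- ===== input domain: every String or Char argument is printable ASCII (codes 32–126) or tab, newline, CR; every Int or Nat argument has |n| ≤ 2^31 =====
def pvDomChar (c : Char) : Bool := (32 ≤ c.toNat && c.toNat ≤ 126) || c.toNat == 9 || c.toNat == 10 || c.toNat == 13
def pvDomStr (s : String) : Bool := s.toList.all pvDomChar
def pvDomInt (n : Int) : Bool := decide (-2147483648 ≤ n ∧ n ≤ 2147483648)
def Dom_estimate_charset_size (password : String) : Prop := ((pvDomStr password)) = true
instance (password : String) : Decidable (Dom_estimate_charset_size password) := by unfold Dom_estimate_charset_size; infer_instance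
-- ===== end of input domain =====

-- B replaces A's five independent scans with one traversal maintaining five category flags (alternative decomposition, same exact weights and final max(size, 1)).


-- ===== PORT A =====
def SYMBOLS : String := "!@#$%^&*()-_=+[]{};:'\",.<>?/|\\`~"

def estimate_charset_size (password : String) : Int :=
  let size : Int := 0
  let size := if password.toList.any PySem.Chars.islower then size + 26 else size
  let size := if password.toList.any PySem.Chars.isupper then size + 26 else size
  let size := if password.toList.any PySem.Chars.isdigit then size + 10 else size
  let size := if password.toList.any (fun c => SYMBOLS.toList.contains c) then size + (PySem.Chars.len SYMBOLS.toList : Int) else size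
  let size := if password.toList.any (fun c => c.toNat > 127) then size + 100 else size
  max size 1

-- ===== PORT B =====
def estimate_charset_size_alt (password : String) : Int :=
  let f := password.toList.foldl
    (fun (f : Bool × Bool × Bool × Bool × Bool) c =>
      ( if PySem.Chars.islower c then true else f.1,
        if PySem.Chars.isupper c then true else f.2.1,
        if PySem.Chars.isdigit c then true else f.2.2.1,
        if SYMBOLS.toList.contains c then true else f.2.2.2.1,
        if c.toNat > 127 then true else f.2.2.2.2 ))
    (false, false, false, false, false)
  let size : Int := 0
  let size := if f.1 then size + 26 else size
  let size := if f.2.1 then size + 26 else size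
  let size := if f.2.2.1 then size + 10 else size
  let size := if f.2.2.2.1 then size + (PySem.Chars.len SYMBOLS.toList : Int) else size
  let size := if f.2.2.2.2 then size + 100 else size
  max size 1

-- ===== PRECONDITION & SPEC =====
def Spec_estimate_charset_size (password : String) (out : Int) : Prop := out = estimate_charset_size_alt password
instance (password : String) (out : Int) : Decidable (Spec_estimate_charset_size password out) := by unfold Spec_estimate_charset_size; infer_instance

-- ===== CLAIM (what is proved, stated in full; the proofs are below) =====
def Claim_equal_estimate_charset_size : Prop := ∀ (password : String), Dom_estimate_charset_size password → Spec_estimate_charset_size password (estimate_charset_size password)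

-- ===== LEMMAS AND PROOFS =====

theorem flag_step' (P : Prop) [Decidable P] (x y : Bool) : ((if P then true else x) || y) = (x || (decide P || y)) := by
  by_cases h : P <;> cases x <;> simp [h]

theorem flags_foldl_eq (l : List Char) (f : Bool × Bool × Bool × Bool × Bool) :
    l.foldl
      (fun (f : Bool × Bool × Bool × Bool × Bool) c =>
        ( if PySem.Chars.islower c then true else f.1,
          if PySem.Chars.isupper c then true else f.2.1,
          if PySem.Chars.isdigit c then true else f.2.2.1,
          if SYMBOLS.toList.contains c then true else f.2.2.2.1,
          if c.toNat > 127 then true else f.2.2.2.2 )) f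
    = ( f.1 || l.any PySem.Chars.islower,
        f.2.1 || l.any PySem.Chars.isupper,
        f.2.2.1 || l.any PySem.Chars.isdigit,
        f.2.2.2.1 || l.any (fun c => SYMBOLS.toList.contains c),
        f.2.2.2.2 || l.any (fun c => c.toNat > 127) ) := by
  induction l generalizing f with
  | nil => simp
  | cons c l ih =>
    simp only [List.foldl_cons, List.any_cons, ih, flag_step', Bool.decide_eq_true]

-- ===== VERDICT (by name: the statement is the Claim_ definition above) =====
theorem estimate_charset_size_spec : Claim_equal_estimate_charset_size := by
  intro password _
  unfold Spec_estimate_charset_size estimate_charset_size estimate_charset_size_alt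
  simp only [flags_foldl_eq, Bool.false_or]
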